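-- pv_equiv track=rewrite | github.com/manas-17045/LeetcodeSolutions | Leetcode 3001-3100/3044/3044-1.py | mostFrequentPrime
-- ===== SOURCE A (Python) =====
-- def mostFrequentPrime(mat: list[list[int]]) -> int:
--     """
--     Finds the most frequent prime number formed by concatenating digits in all eight directions
--     starting from each cell in the given matrix.
--     :param mat: A 2D list of integers representing the matrix.
--     :return: The most frequent prime number. If there are multiple such primes, return the largest one. If no such prime exists, return -1.
--     """
--     m = len(mat)
--     n = len(mat[0])
--
--     primeMemo = {}
--
--     def isPrime(num):
--         if num in primeMemo:
--             return primeMemo[num]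
--         if num <= 1:
--             primeMemo[num] = False
--             return False
--         i = 2
--         while i * i <= num:
--             if num % i == 0:
--                 primeMemo[num] = False
--                 return False
--             i += 1
--         primeMemo[num] = True
--         return True
--
--     freqMap = {}
--
--     directions = [(0, 1), (1, 1), (1, 0), (1, -1), (0, -1), (-1, -1), (-1, 0), (-1, 1)]
--
--     for row in range(m):
--         for col in range(n):
--             for dr, dc in directions:
--                 currentNumber = mat[row][col]
--                 nextRow, nextCol = row + dr, col + dc
--
--                 while 0 <= nextRow < m and 0 <= nextCol < n:
--                     currentNumber = currentNumber * 10 + mat[nextRow][nextCol]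
--                     freqMap[currentNumber] = freqMap.get(currentNumber, 0) + 1
--                     nextRow += dr
--                     nextCol += dc
--
--     maxFreq = 0
--     ans = -1
--
--     sortedNumbers = sorted(freqMap.keys())
--
--     for num in sortedNumbers:
--         if num > 10 and isPrime(num):
--             freq = freqMap[num]
--             if freq >= maxFreq:
--                 maxFreq = freq
--                 ans = num
--
--     return ans
-- ===== SOURCE B (Python) =====
-- def mostFrequentPrime(mat: list[list[int]]) -> int:
--     m, n = len(mat), len(mat[0])
--
--     def ray(r, c, dr, dc, acc):
--         # numbers obtained by extending the concatenation acc step by step from (r, c)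
--         if not (0 <= r < m and 0 <= c < n):
--             return []
--         v = acc * 10 + mat[r][c]
--         return [v] + ray(r + dr, c + dc, dr, dc, v)
--
--     nums = [v
--             for r in range(m)
--             for c in range(n)
--             for dr, dc in ((0, 1), (1, 1), (1, 0), (1, -1), (0, -1), (-1, -1), (-1, 0), (-1, 1))
--             for v in ray(r + dr, c + dc, dr, dc, mat[r][c])]
--
--     cnt = {}
--     for v in nums:
--         cnt[v] = cnt.get(v, 0) + 1
--
--     def is_prime(x):
--         if x < 2:
--             return False
--         if x % 2 == 0:
--             return x == 2
--         d = 3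
--         while d * d <= x:
--             if x % d == 0:
--                 return False
--             d += 2
--         return True
--
--     best = max(((f, v) for v, f in cnt.items() if v > 10 and is_prime(v)), default=None)
--     return best[1] if best is not None else -1
-- ===== Notes on version B (the rewrite author's own statement) =====
-- stated objective: alternative
-- what changed: B builds a flat candidate list via a recursive ray function and one counting pass instead of A's in-place dict updates inside nested while loops, tests primality by trial division over 2 and odd divisors only instead of A's memoized all-divisors loop, and selects the answer as a single (freq, num)-lexicographic max over the counter items instead of A's sort-then-rescan with a >= update.
import Mathlib
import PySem

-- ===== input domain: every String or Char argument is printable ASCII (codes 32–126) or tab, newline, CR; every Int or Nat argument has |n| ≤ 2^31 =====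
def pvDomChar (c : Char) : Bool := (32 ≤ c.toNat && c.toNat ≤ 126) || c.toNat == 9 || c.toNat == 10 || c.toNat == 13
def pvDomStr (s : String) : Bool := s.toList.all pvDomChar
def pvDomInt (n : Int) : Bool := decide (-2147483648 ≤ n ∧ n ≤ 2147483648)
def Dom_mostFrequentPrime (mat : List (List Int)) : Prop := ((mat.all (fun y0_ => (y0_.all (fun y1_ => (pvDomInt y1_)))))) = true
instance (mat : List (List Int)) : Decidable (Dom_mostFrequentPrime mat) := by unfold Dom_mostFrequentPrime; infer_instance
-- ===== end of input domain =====

-- B replaces A's sort-then-rescan selection and memoized trial division by a flat candidate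
-- list counted once, an odd-step trial division, and a single (freq, num) max over the counter
-- items; same return value, structurally different decomposition (objective: alternative).

-- ===== PORT A =====
def pvCellA (mat : List (List Int)) (r c : Int) : Int :=
  PySem.List.pyGetD (PySem.List.pyGetD mat r []) c 0

def pvDirsA : List (Int × Int) := [(0,1),(1,1),(1,0),(1,-1),(0,-1),(-1,-1),(-1,0),(-1,1)]

-- the inner 'while 0 <= nextRow < m and 0 <= nextCol < n' loop of A (fuel bounds the steps; m+n+1 always suffices)
def pvWalkA (mat : List (List Int)) (m n dr dc : Int) :
    Int → Int → Int → PySem.Dict Int Int → Nat → PySem.Dict Int Int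
  | _, _, _, d, 0 => d
  | r, c, cur, d, fuel+1 =>
    if 0 ≤ r ∧ r < m ∧ 0 ≤ c ∧ c < n then
      pvWalkA mat m n dr dc (r + dr) (c + dc) (cur * 10 + pvCellA mat r c)
        (d.insert (cur * 10 + pvCellA mat r c) (d.getD (cur * 10 + pvCellA mat r c) 0 + 1)) fuel
    else d

-- the 'while i * i <= num' trial-division loop of A's isPrime
def pvTrialA (num : Int) : Int → Nat → Bool
  | _, 0 => true
  | i, fuel+1 =>
    if i * i ≤ num then
      (if PySem.Int.mod num i == 0 then false else pvTrialA num (i + 1) fuel)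
    else true

def pvIsPrimeCoreA (num : Int) : Bool :=
  if num ≤ 1 then false else pvTrialA num 2 (num.toNat + 1)

-- A's isPrime with its primeMemo dictionary
def pvIsPrimeA (memo : PySem.Dict Int Bool) (num : Int) : Bool × PySem.Dict Int Bool :=
  match memo.get? num with
  | some b => (b, memo)
  | none => (pvIsPrimeCoreA num, memo.insert num (pvIsPrimeCoreA num))

def mostFrequentPrime (mat : List (List Int)) : Int :=
  let m : Int := (mat.length : Int)
  let n : Int := ((((PySem.List.pyGet? mat 0).getD []).length : Nat) : Int)
  let fuel : Nat := mat.length + ((PySem.List.pyGet? mat 0).getD []).length + 1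
  let freq := (PySem.List.pyRange 0 m 1).foldl (fun d r =>
      (PySem.List.pyRange 0 n 1).foldl (fun d c =>
        pvDirsA.foldl (fun d dir =>
          pvWalkA mat m n dir.1 dir.2 (r + dir.1) (c + dir.2) (pvCellA mat r c) d fuel) d) d)
    PySem.Dict.empty
  let sortedNumbers := PySem.List.sorted freq.keys (fun x => x) false
  let st := sortedNumbers.foldl
    (fun (st : (Int × Int) × PySem.Dict Int Bool) num =>
      if 10 < num then
        match pvIsPrimeA st.2 num with
        | (p, memo') =>
          if p then
            (if st.1.1 ≤ freq.getD num 0 then ((freq.getD num 0, num), memo') else (st.1, memo'))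
          else (st.1, memo')
      else st)
    ((0, -1), (PySem.Dict.empty : PySem.Dict Int Bool))
  st.1.2

-- ===== PORT B =====
def pvCellB (mat : List (List Int)) (r c : Int) : Int :=
  PySem.List.pyGetD (PySem.List.pyGetD mat r []) c 0

def pvDirsB : List (Int × Int) := [(0,1),(1,1),(1,0),(1,-1),(0,-1),(-1,-1),(-1,0),(-1,1)]

-- B's recursive ray(r, c, dr, dc, acc) (fuel bounds the recursion depth; m+n+1 always suffices)
def pvRayB (mat : List (List Int)) (m n dr dc : Int) : Int → Int → Int → Nat → List Int
  | _, _, _, 0 => []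
  | r, c, acc, fuel+1 =>
    if 0 ≤ r ∧ r < m ∧ 0 ≤ c ∧ c < n then
      (acc * 10 + pvCellB mat r c) ::
        pvRayB mat m n dr dc (r + dr) (c + dc) (acc * 10 + pvCellB mat r c) fuel
    else []

-- B's 'while d * d <= x' loop stepping over odd divisors only
def pvTrialOddB (x : Int) : Int → Nat → Bool
  | _, 0 => true
  | d, fuel+1 =>
    if d * d ≤ x then
      (if PySem.Int.mod x d == 0 then false else pvTrialOddB x (d + 2) fuel)
    else true

def pvIsPrimeB (x : Int) : Bool :=
  if x < 2 then false
  else if PySem.Int.mod x 2 == 0 then x == 2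
  else pvTrialOddB x 3 (x.toNat + 1)

def mostFrequentPrime_alt (mat : List (List Int)) : Int :=
  let m : Int := (mat.length : Int)
  let n : Int := ((((PySem.List.pyGet? mat 0).getD []).length : Nat) : Int)
  let fuel : Nat := mat.length + ((PySem.List.pyGet? mat 0).getD []).length + 1
  let nums := (PySem.List.pyRange 0 m 1).flatMap (fun r =>
      (PySem.List.pyRange 0 n 1).flatMap (fun c =>
        pvDirsB.flatMap (fun dir =>
          pvRayB mat m n dir.1 dir.2 (r + dir.1) (c + dir.2) (pvCellB mat r c) fuel)))
  let cnt := nums.foldl (fun d x => d.insert x (d.getD x 0 + 1)) (PySem.Dict.empty : PySem.Dict Int Int)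
  let cands := (cnt.items.filter (fun p => decide (10 < p.1) && pvIsPrimeB p.1)).map
      (fun p => (p.2, p.1))
  match PySem.List.max2? cands (fun p => p.1) (fun p => p.2) with
  | some b => b.2
  | none => -1

-- ===== PRECONDITION & SPEC =====
-- Pre_ excludes exactly the inputs on which Python A raises IndexError: the empty matrix
-- (mat[0]) and ragged matrices whose later rows are shorter than the first row.
def Pre_mostFrequentPrime (mat : List (List Int)) : Prop :=
  mat ≠ [] ∧ ∀ row ∈ mat, (mat.headD []).length ≤ row.length
instance (mat : List (List Int)) : Decidable (Pre_mostFrequentPrime mat) := by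
  unfold Pre_mostFrequentPrime; infer_instance

def pvWitness_mostFrequentPrime : List (List Int) := [[1, 3]]

def Spec_mostFrequentPrime (mat : List (List Int)) (out : Int) : Prop := out = mostFrequentPrime_alt mat
instance (mat : List (List Int)) (out : Int) : Decidable (Spec_mostFrequentPrime mat out) := by
  unfold Spec_mostFrequentPrime; infer_instance

-- ===== CLAIM (what is proved, stated in full; the proofs are below) =====
def Claim_equal_mostFrequentPrime : Prop := ∀ (mat : List (List Int)), Dom_mostFrequentPrime mat → Pre_mostFrequentPrime mat → Spec_mostFrequentPrime mat (mostFrequentPrime mat)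

-- ===== LEMMAS AND PROOFS =====

theorem pvCell_eq (mat : List (List Int)) : pvCellA mat = pvCellB mat := rfl
theorem pvDirs_eq : pvDirsA = pvDirsB := rfl

-- A's while-walk is the fold of the counting update over B's ray
theorem pvWalk_eq (mat : List (List Int)) (m n dr dc : Int) :
    ∀ (fuel : Nat) (r c cur : Int) (d : PySem.Dict Int Int),
    pvWalkA mat m n dr dc r c cur d fuel
      = (pvRayB mat m n dr dc r c cur fuel).foldl (fun d x => d.insert x (d.getD x 0 + 1)) d := by
  intro fuel
  induction fuel with
  | zero => intro r c cur d; rfl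
  | succ f ih =>
    intro r c cur d
    simp only [pvWalkA, pvRayB, pvCellA, pvCellB]
    split_ifs with h
    · simp [List.foldl, ih]
    · rfl

-- no divisor d with i ≤ d and d*d ≤ num
def pvNoDiv (num i : Int) : Prop := ∀ d : Int, i ≤ d → d * d ≤ num → ¬ (d ∣ num)

theorem pvTrialA_spec : ∀ (fuel : Nat) (num i : Int), 2 ≤ i → num.toNat < i.toNat + fuel →
    (pvTrialA num i fuel = true ↔ pvNoDiv num i) := by
  intro fuel
  induction fuel with
  | zero =>
    intro num i hi hf
    simp only [Nat.add_zero] at hf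
    have hni : num < i := by omega
    simp only [pvTrialA, true_iff]
    intro d hd hdd
    exfalso
    have h1 : 0 < d := by omega
    nlinarith
  | succ f ih =>
    intro num i hi hf
    simp only [pvTrialA]
    split_ifs with h1 h2
    · simp only [beq_iff_eq] at h2
      have hdvd : i ∣ num := (PySem.Int.mod_eq_zero_iff_dvd num i).mp h2
      constructor
      · intro hfalse; exact absurd hfalse (by simp)
      · intro hnd; exact absurd (hnd i le_rfl h1 hdvd) (fun h => h)
    · rw [ih num (i+1) (by omega) (by omega)]
      simp only [beq_iff_eq] at h2
      have hndvd : ¬ (i ∣ num) := fun hd => h2 ((PySem.Int.mod_eq_zero_iff_dvd num i).mpr hd)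
      constructor
      · intro hnd d hd hdd hdvd
        rcases eq_or_lt_of_le hd with heq | hlt
        · exact hndvd (heq ▸ hdvd)
        · exact hnd d (by omega) hdd hdvd
      · intro hnd d hd hdd hdvd; exact hnd d (by omega) hdd hdvd
    · simp only [true_iff]
      intro d hd hdd hdvd
      have : i * i ≤ d * d := by nlinarith
      omega

def pvNoOddDiv (num i : Int) : Prop := ∀ d : Int, i ≤ d → d % 2 = 1 → d * d ≤ num → ¬ (d ∣ num)

theorem pvTrialOddB_spec : ∀ (fuel : Nat) (num i : Int), 3 ≤ i → i % 2 = 1 →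
    num.toNat < i.toNat + fuel →
    (pvTrialOddB num i fuel = true ↔ pvNoOddDiv num i) := by
  intro fuel
  induction fuel with
  | zero =>
    intro num i hi hodd hf
    have hni : num < i := by omega
    simp only [pvTrialOddB, true_iff]
    intro d hd _ hdd
    exfalso; nlinarith
  | succ f ih =>
    intro num i hi hodd hf
    simp only [pvTrialOddB]
    split_ifs with h1 h2
    · simp only [beq_iff_eq] at h2
      have hdvd : i ∣ num := (PySem.Int.mod_eq_zero_iff_dvd num i).mp h2
      simp only [false_iff]
      intro hnd; exact hnd i le_rfl hodd h1 hdvd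
    · rw [ih num (i+2) (by omega) (by omega) (by omega)]
      simp only [beq_iff_eq] at h2
      have hndvd : ¬ (i ∣ num) := fun hd => h2 ((PySem.Int.mod_eq_zero_iff_dvd num i).mpr hd)
      constructor
      · intro hnd d hd hdo hdd hdvd
        rcases eq_or_lt_of_le hd with heq | hlt
        · exact hndvd (heq ▸ hdvd)
        · exact hnd d (by omega) hdo hdd hdvd
      · intro hnd d hd hdo hdd hdvd; exact hnd d (by omega) hdo hdd hdvd
    · simp only [true_iff]
      intro d hd _ hdd hdvd
      have : i * i ≤ d * d := by nlinarith
      omega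

-- for candidates > 10, A's trial division and B's odd-step trial division agree
theorem pvPrime_eq (num : Int) (h : 10 < num) : pvIsPrimeCoreA num = pvIsPrimeB num := by
  have hmod2 : PySem.Int.mod num 2 = num % 2 := PySem.Int.mod_eq_emod_of_pos (by omega)
  rw [Bool.eq_iff_iff]
  rw [pvIsPrimeCoreA, pvIsPrimeB, if_neg (by omega : ¬ num ≤ 1), if_neg (by omega : ¬ num < 2)]
  rw [pvTrialA_spec (num.toNat + 1) num 2 (by omega) (by omega)]
  by_cases heven : num % 2 = 0
  · rw [if_pos (by simpa [hmod2] using heven)]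
    constructor
    · intro hnd
      exfalso
      exact hnd 2 le_rfl (by omega) (Int.dvd_of_emod_eq_zero heven)
    · intro hb; exfalso; revert hb; simp; omega
  · rw [if_neg (by simpa [hmod2] using heven)]
    rw [pvTrialOddB_spec (num.toNat + 1) num 3 (by omega) (by omega) (by omega)]
    constructor
    · intro hnd d hd _ hdd hdvd; exact hnd d (by omega) hdd hdvd
    · intro hnd d hd hdd hdvd
      have hdodd : d % 2 = 1 := by
        rcases Int.emod_two_eq_zero_or_one d with h2 | h2
        · exfalso
          have h2d : (2 : Int) ∣ d := Int.dvd_of_emod_eq_zero h2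
          have : (2 : Int) ∣ num := h2d.trans hdvd
          exact heven (Int.emod_eq_zero_of_dvd this)
        · exact h2
      exact hnd d (by omega) hdodd hdd hdvd

-- the primeMemo invariant
def pvMemoOK (memo : PySem.Dict Int Bool) : Prop :=
  ∀ k b, memo.get? k = some b → b = pvIsPrimeCoreA k

theorem pvMemoOK_empty : pvMemoOK PySem.Dict.empty := by
  intro k b h
  rw [PySem.Dict.get?_empty] at h
  cases h

theorem pvIsPrimeA_fst (memo : PySem.Dict Int Bool) (num : Int) (h : pvMemoOK memo) :
    (pvIsPrimeA memo num).1 = pvIsPrimeCoreA num := by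
  unfold pvIsPrimeA
  cases hm : memo.get? num with
  | none => rfl
  | some b => exact h num b hm

theorem pvIsPrimeA_ok (memo : PySem.Dict Int Bool) (num : Int) (h : pvMemoOK memo) :
    pvMemoOK (pvIsPrimeA memo num).2 := by
  unfold pvIsPrimeA
  cases hm : memo.get? num with
  | none =>
    intro k b hk
    rw [PySem.Dict.get?_insert] at hk
    split_ifs at hk with hkn
    · cases hk; subst hkn; rfl
    · exact h k b hk
  | some b => exact h

-- dropping the memo from A's final scan
theorem pvScanMemo_eq (d : PySem.Dict Int Int) :
    ∀ (S : List Int) (st : Int × Int) (memo : PySem.Dict Int Bool), pvMemoOK memo →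
    (S.foldl
      (fun (st : (Int × Int) × PySem.Dict Int Bool) num =>
        if 10 < num then
          match pvIsPrimeA st.2 num with
          | (p, memo') =>
            if p then
              (if st.1.1 ≤ d.getD num 0 then ((d.getD num 0, num), memo') else (st.1, memo'))
            else (st.1, memo')
        else st)
      (st, memo)).1
    = S.foldl
      (fun st num =>
        if 10 < num then
          (if pvIsPrimeCoreA num then
            (if st.1 ≤ d.getD num 0 then (d.getD num 0, num) else st)
          else st)
        else st) st := by
  intro S
  induction S with
  | nil => intro st memo h; rfl
  | cons x S ih =>
    intro st memo h
    simp only [List.foldl_cons]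
    by_cases hx : 10 < x
    · simp only [if_pos hx]
      rcases hp : pvIsPrimeA memo x with ⟨p, memo'⟩
      have hfst : p = pvIsPrimeCoreA x := by
        have := pvIsPrimeA_fst memo x h; rw [hp] at this; exact this
      have hok : pvMemoOK memo' := by
        have := pvIsPrimeA_ok memo x h; rw [hp] at this; exact this
      subst hfst
      by_cases hpr : pvIsPrimeCoreA x
      · simp only [hpr, if_pos]
        by_cases hle : st.1 ≤ d.getD x 0
        · simp only [hle, if_pos]; exact ih _ _ hok
        · simp only [hle, if_false]; exact ih _ _ hok
      · simp only [hpr, Bool.false_eq_true, if_false]; exact ih _ _ hok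
    · simp only [if_neg hx]; exact ih st memo h

-- A's ascending scan with '>=' computes the (freq, num)-lexicographic maximum
theorem pvScan_lexmax (good : Int → Bool) (F : Int → Int) :
    ∀ (S : List Int), S.Pairwise (· < ·) → (∀ x ∈ S, 1 ≤ F x) →
    ((∀ k ∈ S, good k = false) ∧
      S.foldl (fun st num => if good num then (if st.1 ≤ F num then (F num, num) else st) else st)
        ((0 : Int), (-1 : Int)) = (0, -1)) ∨
    (∃ k, k ∈ S ∧ good k = true ∧
      S.foldl (fun st num => if good num then (if st.1 ≤ F num then (F num, num) else st) else st)
        ((0 : Int), (-1 : Int)) = (F k, k) ∧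
      ∀ k' ∈ S, good k' = true → F k' < F k ∨ (F k' = F k ∧ k' ≤ k)) := by
  intro S
  induction S using List.reverseRecOn with
  | nil => intro _ _; left; exact ⟨by simp, rfl⟩
  | append_singleton S k ih =>
    intro hpw hF
    have hpw' : S.Pairwise (· < ·) := (List.pairwise_append.mp hpw).1
    have hlt : ∀ x ∈ S, x < k := by
      intro x hx
      exact (List.pairwise_append.mp hpw).2.2 x hx k (List.mem_singleton_self k)
    have hF' : ∀ x ∈ S, 1 ≤ F x := fun x hx => hF x (List.mem_append_left _ hx)
    have hFk : 1 ≤ F k := hF k (List.mem_append_right _ (List.mem_singleton_self k))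
    rw [List.foldl_append]
    rcases ih hpw' hF' with ⟨hnone, heq⟩ | ⟨k0, hk0, hg0, heq, hmax⟩
    · rw [heq]
      by_cases hg : good k
      · right
        refine ⟨k, List.mem_append_right _ (List.mem_singleton_self k), hg, ?_, ?_⟩
        · simp only [List.foldl_cons, List.foldl_nil, hg, if_pos]
          rw [if_pos (by omega : (0:Int) ≤ F k)]
        · intro k' hk' hgk'
          rcases List.mem_append.mp hk' with h | h
          · exact absurd hgk' (by simp [hnone k' h])
          · rw [List.mem_singleton.mp h]; right; exact ⟨rfl, le_refl k⟩
      · left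
        refine ⟨?_, ?_⟩
        · intro k' hk'
          rcases List.mem_append.mp hk' with h | h
          · exact hnone k' h
          · rw [List.mem_singleton.mp h]; simpa using hg
        · simp [hg]
    · rw [heq]
      by_cases hg : good k
      · by_cases hle : F k0 ≤ F k
        · right
          refine ⟨k, List.mem_append_right _ (List.mem_singleton_self k), hg, by simp [hg, hle], ?_⟩
          intro k' hk' hgk'
          rcases List.mem_append.mp hk' with h | h
          · have h4 := hlt k' h
            rcases hmax k' h hgk' with h1 | ⟨h1, h2⟩ <;> omega
          · rw [List.mem_singleton.mp h]; right; exact ⟨rfl, le_refl k⟩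
        · right
          refine ⟨k0, List.mem_append_left _ hk0, hg0, by simp [hg, hle], ?_⟩
          intro k' hk' hgk'
          rcases List.mem_append.mp hk' with h | h
          · exact hmax k' h hgk'
          · rw [List.mem_singleton.mp h]; left; omega
      · right
        refine ⟨k0, List.mem_append_left _ hk0, hg0, by simp [hg], ?_⟩
        intro k' hk' hgk'
        rcases List.mem_append.mp hk' with h | h
        · exact hmax k' h hgk'
        · rw [List.mem_singleton.mp h] at hgk'; rw [hgk'] at hg; exact absurd rfl hg

-- B's max2? update function, named for the proofs
def pvLexUpd (acc : Option (Int × Int)) (x : Int × Int) : Option (Int × Int) :=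
  match acc with
  | none => some x
  | some m =>
    if (decide (m.1 < x.1) || !decide (x.1 < m.1) && decide (m.2 < x.2)) = true then some x
    else some m

theorem pvLexUpd_some (m x : Int × Int) :
    pvLexUpd (some m) x = if m.1 < x.1 ∨ (¬ x.1 < m.1 ∧ m.2 < x.2) then some x else some m := by
  show (if (decide (m.1 < x.1) || !decide (x.1 < m.1) && decide (m.2 < x.2)) = true
      then some x else some m) = _
  rcases Decidable.em (m.1 < x.1 ∨ (¬ x.1 < m.1 ∧ m.2 < x.2)) with h | h
  · rw [if_pos h]
    rcases h with h | ⟨h1, h2⟩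
    · simp [h]
    · simp [h1, h2]
  · rw [if_neg h]
    have h5 : ¬ (m.1 < x.1) := fun hh => h (Or.inl hh)
    by_cases hq1 : x.1 < m.1
    · simp [h5, hq1]
    · have h7 : ¬ m.2 < x.2 := fun hh => h (Or.inr ⟨hq1, hh⟩)
      simp [h5, hq1, h7]

theorem pvMax2_eq (L : List (Int × Int)) :
    PySem.List.max2? L (fun p => p.1) (fun p => p.2) = L.foldl pvLexUpd none := by
  unfold PySem.List.max2?
  apply PySem.List.foldl_congr_mem
  intro acc x _
  cases acc <;> rfl

theorem pvMax2_go :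
    ∀ (L : List (Int × Int)) (m : Int × Int),
    ∃ p, L.foldl pvLexUpd (some m) = some p ∧ (p = m ∨ p ∈ L) ∧
      (m.1 < p.1 ∨ (m.1 = p.1 ∧ m.2 ≤ p.2)) ∧
      ∀ q ∈ L, q.1 < p.1 ∨ (q.1 = p.1 ∧ q.2 ≤ p.2) := by
  intro L
  induction L with
  | nil => intro m; exact ⟨m, rfl, Or.inl rfl, by omega, by simp⟩
  | cons x L ih =>
    intro m
    simp only [List.foldl_cons, pvLexUpd_some]
    by_cases hc : m.1 < x.1 ∨ (¬ x.1 < m.1 ∧ m.2 < x.2)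
    · rw [if_pos hc]
      obtain ⟨p, hfold, hmem, hge, hmax⟩ := ih x
      refine ⟨p, hfold, ?_, ?_, ?_⟩
      · rcases hmem with h | h
        · right; exact h ▸ List.mem_cons_self ..
        · right; exact List.mem_cons_of_mem x h
      · rcases hc with h | ⟨h1, h2⟩ <;> omega
      · intro q hq
        rcases List.mem_cons.mp hq with h | h
        · subst h; exact hge
        · exact hmax q h
    · rw [if_neg hc]
      obtain ⟨p, hfold, hmem, hge, hmax⟩ := ih m
      refine ⟨p, hfold, ?_, hge, ?_⟩
      · rcases hmem with h | h
        · left; exact h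
        · right; exact List.mem_cons_of_mem x h
      · intro q hq
        rcases List.mem_cons.mp hq with h | h
        · subst h
          have h5 : ¬ (m.1 < q.1) := fun hh => hc (Or.inl hh)
          by_cases hq1 : q.1 < m.1
          · rcases hge with h3 | ⟨h3, h4⟩ <;> omega
          · have h7 : ¬ m.2 < q.2 := fun hh => hc (Or.inr ⟨hq1, hh⟩)
            rcases hge with h3 | ⟨h3, h4⟩ <;> omega
        · exact hmax q h

-- B's max2? picks a lexicographically greatest pair (the first one; here keys are distinct)
theorem pvMax2_spec : ∀ (L : List (Int × Int)),
    (L = [] ∧ PySem.List.max2? L (fun p => p.1) (fun p => p.2) = none) ∨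
    (∃ p, p ∈ L ∧ PySem.List.max2? L (fun p => p.1) (fun p => p.2) = some p ∧
      ∀ q ∈ L, q.1 < p.1 ∨ (q.1 = p.1 ∧ q.2 ≤ p.2)) := by
  intro L
  rw [pvMax2_eq]
  cases L with
  | nil => left; exact ⟨rfl, rfl⟩
  | cons x L =>
    right
    simp only [List.foldl_cons]
    obtain ⟨p, hfold, hmem, hge, hmax⟩ := pvMax2_go L x
    have hupd : pvLexUpd none x = some x := rfl
    rw [hupd]
    refine ⟨p, ?_, hfold, ?_⟩
    · rcases hmem with h | h
      · exact h ▸ List.mem_cons_self ..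
      · exact List.mem_cons_of_mem x h
    · intro q hq
      rcases List.mem_cons.mp hq with h | h
      · subst h; exact hge
      · exact hmax q h

-- the common candidate filter, A's version
def pvGood (k : Int) : Bool := decide (10 < k) && pvIsPrimeCoreA k

theorem pvGood_eq_B (k : Int) : (decide (10 < k) && pvIsPrimeB k) = pvGood k := by
  unfold pvGood
  by_cases h : 10 < k
  · simp [h, pvPrime_eq k h]
  · simp [h]

-- the main equivalence
theorem pv_main (mat : List (List Int)) : mostFrequentPrime mat = mostFrequentPrime_alt mat := by
  unfold mostFrequentPrime mostFrequentPrime_alt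
  simp only [pvWalk_eq, pvCell_eq, pvDirs_eq, ← List.foldl_flatMap,
    PySem.Dict.foldl_insert_getD_add_one_eq_counter]
  generalize (List.flatMap
      (fun r =>
        List.flatMap
          (fun c =>
            List.flatMap
              (fun dir =>
                pvRayB mat ((mat.length : Nat) : Int) ((((PySem.List.pyGet? mat 0).getD []).length : Nat) : Int) dir.1
                  dir.2 (r + dir.1) (c + dir.2) (pvCellB mat r c)
                  (mat.length + ((PySem.List.pyGet? mat 0).getD []).length + 1))
              pvDirsB)
          (PySem.List.pyRange 0 ((((PySem.List.pyGet? mat 0).getD []).length : Nat) : Int)))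
      (PySem.List.pyRange 0 ((mat.length : Nat) : Int))) = nums
  rw [PySem.Dict.keys_counter, PySem.Dict.items_counter]
  rw [pvScanMemo_eq _ _ _ _ pvMemoOK_empty]
  simp only [PySem.Dict.getD_counter]
  rw [List.filter_map, List.map_map]
  simp only [Function.comp_def]
  simp only [pvGood_eq_B]
  have hcong := PySem.List.foldl_congr_mem
    (PySem.List.sorted (PySem.Set.ofList nums) fun x => x)
    (fun (st : Int × Int) num =>
      if 10 < num then
        if pvIsPrimeCoreA num = true then
          if st.1 ≤ ((nums.count num : Nat) : Int) then (((nums.count num : Nat) : Int), num) else st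
        else st
      else st)
    (fun (st : Int × Int) num => if pvGood num then
      (if st.1 ≤ ((nums.count num : Nat) : Int) then (((nums.count num : Nat) : Int), num) else st)
      else st)
    ((0 : Int), (-1 : Int))
    (by
      intro st num _
      by_cases h1 : 10 < num
      · by_cases h2 : pvIsPrimeCoreA num <;> simp [pvGood, h1, h2]
      · simp [pvGood, h1])
  rw [hcong]
  clear hcong
  -- characterize both sides
  have hpw := PySem.List.sorted_ofList_pairwise_lt nums
  have hF : ∀ x ∈ (PySem.List.sorted (PySem.Set.ofList nums) fun x => x), (1 : Int) ≤ ((nums.count x : Nat) : Int) := by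
    intro x hx
    rw [PySem.List.mem_sorted] at hx
    have hx2 := (PySem.Set.mem_ofList nums x).mp hx
    have hx3 : 0 < nums.count x := List.count_pos_iff.mpr hx2
    exact_mod_cast hx3
  rcases pvScan_lexmax pvGood (fun k => ((nums.count k : Nat) : Int))
      (PySem.List.sorted (PySem.Set.ofList nums) fun x => x) hpw hF with
    ⟨hnone, heq⟩ | ⟨k0, hk0, hg0, heq, hmax⟩ <;>
  rw [heq] <;>
  rcases pvMax2_spec (List.map (fun x => (((nums.count x : Nat) : Int), x))
      (List.filter (fun x => pvGood x) (PySem.Set.ofList nums))) with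
    ⟨hLnil, hm2⟩ | ⟨p, hpL, hm2, hpmax⟩ <;>
  rw [hm2]
  · -- A found nothing good, but B found p: contradiction
    exfalso
    obtain ⟨kp, hkpf, rfl⟩ := List.mem_map.mp hpL
    have hkpK := List.mem_filter.mp hkpf
    have hkpS : kp ∈ (PySem.List.sorted (PySem.Set.ofList nums) fun x => x) :=
      (PySem.List.mem_sorted _ _ _ _).mpr hkpK.1
    have := hnone kp hkpS
    rw [this] at hkpK
    exact absurd hkpK.2 (by simp)
  · -- A found k0, but B's list is empty: contradiction
    exfalso
    have hk0K : k0 ∈ PySem.Set.ofList nums := (PySem.List.mem_sorted _ _ _ _).mp hk0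
    have : (((nums.count k0 : Nat) : Int), k0) ∈
        List.map (fun x => (((nums.count x : Nat) : Int), x))
          (List.filter (fun x => pvGood x) (PySem.Set.ofList nums)) :=
      List.mem_map.mpr ⟨k0, List.mem_filter.mpr ⟨hk0K, by simpa using hg0⟩, rfl⟩
    rw [hLnil] at this
    exact absurd this (by simp)
  · -- both found a maximum: they are equal
    obtain ⟨kp, hkpf, rfl⟩ := List.mem_map.mp hpL
    have hkpK := List.mem_filter.mp hkpf
    have hkpS : kp ∈ (PySem.List.sorted (PySem.Set.ofList nums) fun x => x) :=
      (PySem.List.mem_sorted _ _ _ _).mpr hkpK.1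
    have hk0K : k0 ∈ PySem.Set.ofList nums := (PySem.List.mem_sorted _ _ _ _).mp hk0
    have hq : (((nums.count k0 : Nat) : Int), k0) ∈
        List.map (fun x => (((nums.count x : Nat) : Int), x))
          (List.filter (fun x => pvGood x) (PySem.Set.ofList nums)) :=
      List.mem_map.mpr ⟨k0, List.mem_filter.mpr ⟨hk0K, by simpa using hg0⟩, rfl⟩
    have h1 := hpmax _ hq
    have h2 := hmax kp hkpS (by simpa using hkpK.2)
    dsimp only at h1 h2 ⊢
    omega

-- ===== VERDICT (by name: the statement is the Claim_ definition above) =====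
theorem mostFrequentPrime_spec : Claim_equal_mostFrequentPrime := by
  intro mat _ _
  unfold Spec_mostFrequentPrime
  exact pv_main mat
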